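-- pv_equiv track=rewrite | github.com/ArtemyRus/pyCourse | mods/mod2/task7.py | foo
-- ===== SOURCE A (Python) =====
-- def foo(s :str, c) -> int:
--     count = 0
--     for i in range(len(s)):
--         if(s[i] == c):
--             while(i < len(s) and s[i] == c):
--                 i += 1
--                 count += 1
--             break
--     return count
-- ===== SOURCE B (Python) =====
-- def foo(s: str, c) -> int:
--     # Scan the string run by run: for each maximal run of equal characters,
--     # if its character equals c, return the run's length; otherwise jump past it.
--     n = len(s)
--     i = 0
--     while i < n:
--         j = i
--         while j < n and s[j] == s[i]:
--             j += 1
--         if s[i] == c: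
--             return j - i
--         i = j
--     return 0
-- ===== Notes on version B (the rewrite author's own statement) =====
-- stated objective: alternative
-- what changed: B decomposes the string into maximal runs of equal characters and returns the length of the first run whose character equals c, instead of A's search for the first index matching c followed by a forward count.
import Mathlib
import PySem

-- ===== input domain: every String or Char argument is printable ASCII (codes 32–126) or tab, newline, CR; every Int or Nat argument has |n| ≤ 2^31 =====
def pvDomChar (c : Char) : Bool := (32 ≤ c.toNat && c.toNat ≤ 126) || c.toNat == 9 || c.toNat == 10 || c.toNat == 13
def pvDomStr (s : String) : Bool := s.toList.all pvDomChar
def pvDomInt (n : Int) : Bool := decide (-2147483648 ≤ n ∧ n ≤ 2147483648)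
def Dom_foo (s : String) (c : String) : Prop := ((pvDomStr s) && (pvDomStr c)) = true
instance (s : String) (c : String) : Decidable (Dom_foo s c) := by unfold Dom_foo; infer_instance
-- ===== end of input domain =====

-- B scans the string run by run (maximal runs of equal chars) and returns the length of the
-- first run whose character equals c, instead of A's find-first-index-then-count-forward; alternative decomposition, same cost.


-- ===== PORT A =====
-- Python's `s[i] == c` compares the one-char string s[i] with c; ported exactly as
-- equality of c's char list with the singleton [s[i]].

-- inner `while i < len(s) and s[i] == c: i += 1; count += 1`
def fooWhile (s : List Char) (c : String) (i : Nat) (count : Int) : Int :=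
  if h : i < s.length then
    if c.toList = [s[i]] then fooWhile s c (i+1) (count+1) else count
  else count
termination_by s.length - i

-- `for i in range(len(s)): if s[i] == c: <while>; break`
def fooGo (s : List Char) (c : String) (i : Nat) : Int :=
  if h : i < s.length then
    if c.toList = [s[i]] then fooWhile s c i 0 else fooGo s c (i+1)
  else 0
termination_by s.length - i

def foo (s : String) (c : String) : Int := fooGo s.toList c 0

-- ===== PORT B =====
-- inner `while j < n and s[j] == s[i]: j += 1`  (k is s[i])
def fooAdv (s : List Char) (k : Char) (j : Nat) : Nat :=
  if h : j < s.length then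
    if s[j] = k then fooAdv s k (j+1) else j
  else j
termination_by s.length - j

theorem fooAdv_ge_aux (s : List Char) (k : Char) : ∀ n j, s.length - j ≤ n → j ≤ fooAdv s k j := by
  intro n
  induction n with
  | zero =>
    intro j hj
    rw [fooAdv]
    split
    · omega
    · exact le_refl j
  | succ n ih =>
    intro j hj
    rw [fooAdv]
    split
    · split
      · exact le_trans (Nat.le_succ j) (ih (j+1) (by omega))
      · exact le_refl j
    · exact le_refl j

theorem fooAdv_ge (s : List Char) (k : Char) (j : Nat) : j ≤ fooAdv s k j :=
  fooAdv_ge_aux s k s.length j (by omega)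

theorem fooAdv_step (s : List Char) (k : Char) (j : Nat) (h : j < s.length) (he : s[j] = k) :
    fooAdv s k j = fooAdv s k (j+1) := by
  rw [fooAdv]; simp [h, he]

-- outer run-by-run loop of B
def fooAltGo (s : List Char) (c : String) (i : Nat) : Int :=
  if h : i < s.length then
    let j := fooAdv s s[i] i
    if c.toList = [s[i]] then (j : Int) - (i : Int) else fooAltGo s c j
  else 0
termination_by s.length - i
decreasing_by
  have h1 : fooAdv s s[i] i = fooAdv s s[i] (i+1) := fooAdv_step s s[i] i h rfl
  have h2 : i + 1 ≤ fooAdv s s[i] (i+1) := fooAdv_ge s s[i] (i+1)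
  omega

def foo_alt (s : String) (c : String) : Int := fooAltGo s.toList c 0

-- ===== PRECONDITION & SPEC =====
def Spec_foo (s : String) (c : String) (out : Int) : Prop := out = foo_alt s c
instance (s : String) (c : String) (out : Int) : Decidable (Spec_foo s c out) := by unfold Spec_foo; infer_instance

-- ===== CLAIM (what is proved, stated in full; the proofs are below) =====
def Claim_equal_foo : Prop := ∀ (s : String) (c : String), Dom_foo s c → Spec_foo s c (foo s c)

-- ===== LEMMAS AND PROOFS =====

-- A's counting while-loop counts exactly up to B's run boundary, when c is the run's char.
theorem fooWhile_adv (s : List Char) (c : String) (k : Char) (hc : c.toList = [k]) :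
    ∀ n i count, s.length - i ≤ n →
      fooWhile s c i count = count + ((fooAdv s k i : Int) - (i : Int)) := by
  intro n
  induction n with
  | zero =>
    intro i count hi
    rw [fooWhile, fooAdv]
    split
    · omega
    · simp
  | succ n ih =>
    intro i count hi
    rw [fooWhile]
    split
    · rename_i h
      by_cases he : s[i] = k
      · have hcond : c.toList = [s[i]] := by rw [hc, he]
        rw [if_pos hcond, ih (i+1) (count+1) (by omega), fooAdv_step s k i h he]
        push_cast; ring
      · have hcond : ¬ (c.toList = [s[i]]) := by
          rw [hc]; intro hx
          exact he (List.cons.injEq .. ▸ hx).1.symm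
        rw [if_neg hcond, fooAdv, dif_pos h, if_neg he]
        ring
    · rename_i h
      rw [fooAdv]
      simp [h]

-- A's index loop steps unchanged across a run of a non-matching character.
theorem fooGo_skip (s : List Char) (c : String) (k : Char) (hk : c.toList ≠ [k]) :
    ∀ n i, s.length - i ≤ n → fooGo s c (fooAdv s k i) = fooGo s c i := by
  intro n
  induction n with
  | zero =>
    intro i hi
    rw [fooAdv]
    split
    · omega
    · rfl
  | succ n ih =>
    intro i hi
    rw [fooAdv]
    split
    · rename_i h
      split
      · rename_i he
        have hcond : ¬ (c.toList = [s[i]]) := by rw [he]; exact hk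
        rw [ih (i+1) (by omega)]
        conv_rhs => rw [fooGo]
        rw [dif_pos h, if_neg hcond]
      · rfl
    · rfl

theorem fooGo_eq_alt (s : List Char) (c : String) :
    ∀ n i, s.length - i ≤ n → fooGo s c i = fooAltGo s c i := by
  intro n
  induction n with
  | zero =>
    intro i hi
    rw [fooGo, fooAltGo]
    split
    · omega
    · rfl
  | succ n ih =>
    intro i hi
    rw [fooGo, fooAltGo]
    split
    · rename_i h
      by_cases hP : c.toList = [s[i]]
      · rw [if_pos hP, if_pos hP,
          fooWhile_adv s c s[i] hP (s.length - i) i 0 (by omega)]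
        ring
      · rw [if_neg hP, if_neg hP]
        have hstep : fooAdv s s[i] i = fooAdv s s[i] (i+1) := fooAdv_step s s[i] i h rfl
        have hge : i + 1 ≤ fooAdv s s[i] (i+1) := fooAdv_ge s s[i] (i+1)
        rw [hstep, ← fooGo_skip s c s[i] hP (s.length - (i+1)) (i+1) (by omega)]
        exact ih (fooAdv s s[i] (i+1)) (by omega)
    · rfl

-- ===== VERDICT (by name: the statement is the Claim_ definition above) =====
theorem foo_spec : Claim_equal_foo := by
  intro s c _
  unfold Spec_foo foo foo_alt
  exact fooGo_eq_alt s.toList c s.toList.length 0 (by omega)
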